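-- pv_equiv track=rewrite | github.com/neobsenko/stefan | reduct/detectors/merger.py | _merge_person_widest
-- ===== SOURCE A (Python) =====
-- from typing import Dict, List, Optional, Set, Tuple
--
-- def _overlaps(a: Tuple[int, int], b: Tuple[int, int]) -> bool:
--     """Two half-open intervals overlap iff they share any positions."""
--     return a[0] < b[1] and b[0] < a[1]
--
-- def _merge_person_widest(
--     spans: List[Tuple[int, int, str, str, int]],
--     blocked: List[Tuple[int, int, str, str, int]],
-- ) -> List[Tuple[int, int, str, str, int]]:
--     """Among PERSON spans, prefer the widest overlapping candidate; then priority."""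
--     spans = sorted(
--         spans,
--         key=lambda x: (-(x[1] - x[0]), -x[4], x[0]),
--     )
--     accepted: List[Tuple[int, int, str, str, int]] = []
--     for span in spans:
--         start, end = span[0], span[1]
--         if any(_overlaps((start, end), (b[0], b[1])) for b in blocked):
--             continue
--         if any(_overlaps((start, end), (a[0], a[1])) for a in accepted):
--             continue
--         accepted.append(span)
--     return accepted
-- ===== SOURCE B (Python) =====
-- def _merge_person_widest(spans, blocked):
--     """Selection-based rewrite: no sort -- pre-filter blocked once, then repeatedly
--     pick the best remaining candidate (widest, then priority, then start; first on
--     ties) and prune everything it overlaps from the pool."""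
--
--     def key(x):
--         return (x[0] - x[1], -x[4], x[0])
--
--     pool = [sp for sp in spans
--             if not any(sp[0] < b[1] and b[0] < sp[1] for b in blocked)]
--     accepted = []
--     while pool:
--         best = pool[0]
--         for sp in pool[1:]:
--             if key(sp) < key(best):
--                 best = sp
--         accepted.append(best)
--         rest = []
--         removed = False
--         for sp in pool:
--             if not removed and sp == best:
--                 removed = True
--             elif not (sp[0] < best[1] and best[0] < sp[1]):
--                 rest.append(sp)
--         pool = rest
--     return accepted
-- ===== Notes on version B (the rewrite author's own statement) =====
-- stated objective: alternative
-- what changed: A sorts all spans by (width, priority, start) and then scans each candidate against the blocked list and the accepted list; B never sorts: it filters blocked-overlapping spans once up front, then repeatedly selects the best remaining candidate (widest, then priority, then start, first on ties) and prunes everything overlapping it from the pool, so no accepted-list scan is ever needed.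
import Mathlib
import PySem

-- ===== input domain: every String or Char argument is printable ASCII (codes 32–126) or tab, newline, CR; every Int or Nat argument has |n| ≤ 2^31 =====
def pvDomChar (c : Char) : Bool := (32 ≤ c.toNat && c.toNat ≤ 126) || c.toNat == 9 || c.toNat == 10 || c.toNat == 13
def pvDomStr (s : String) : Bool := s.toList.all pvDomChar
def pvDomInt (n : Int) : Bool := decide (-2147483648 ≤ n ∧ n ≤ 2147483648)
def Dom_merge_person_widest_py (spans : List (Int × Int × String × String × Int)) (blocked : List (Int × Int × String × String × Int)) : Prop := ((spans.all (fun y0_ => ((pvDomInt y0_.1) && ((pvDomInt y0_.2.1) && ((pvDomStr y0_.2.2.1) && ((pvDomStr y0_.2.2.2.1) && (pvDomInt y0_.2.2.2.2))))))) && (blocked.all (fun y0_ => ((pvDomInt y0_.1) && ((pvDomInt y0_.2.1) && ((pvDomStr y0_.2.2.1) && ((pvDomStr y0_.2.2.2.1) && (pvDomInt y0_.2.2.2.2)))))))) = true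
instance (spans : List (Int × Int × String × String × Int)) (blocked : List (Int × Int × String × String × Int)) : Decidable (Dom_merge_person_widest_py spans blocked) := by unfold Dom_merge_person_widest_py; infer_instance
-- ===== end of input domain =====

-- B replaces A's sort-then-scan by a selection loop (pre-filter blocked once, then repeatedly
-- pick the best remaining candidate and prune what it overlaps); objective: alternative, same cost.

abbrev PvSpan : Type := Int × Int × String × String × Int

-- ===== PORT A =====
-- helper _overlaps(a, b)
def pvOverlapsPy (a : Int × Int) (b : Int × Int) : Bool := decide (a.1 < b.2) && decide (b.1 < a.2)

-- Python's `<` on the sort-key tuples (-(x1-x0), -x4, x0): lexicographic comparison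
def pvSpanLt (x y : PvSpan) : Bool :=
  if -(x.2.1 - x.1) ≠ -(y.2.1 - y.1) then decide (-(x.2.1 - x.1) < -(y.2.1 - y.1))
  else if -(x.2.2.2.2) ≠ -(y.2.2.2.2) then decide (-(x.2.2.2.2) < -(y.2.2.2.2))
  else decide (x.1 < y.1)

-- sorted(spans, key=…): PySem.List.sorted IS this foldl/insertBy (sorted_eq_foldl_insertBy, rfl);
-- pvSpanLt is `decide (key a < key b)` for Python's tuple key.
def pvSortSpans (spans : List PvSpan) : List PvSpan :=
  spans.foldl (fun acc x => PySem.List.insertBy pvSpanLt x acc) []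

def merge_person_widest_py (spans : List (Int × Int × String × String × Int)) (blocked : List (Int × Int × String × String × Int)) : List (Int × Int × String × String × Int) :=
  let ss := pvSortSpans spans
  ss.foldl (fun accepted span =>
    if blocked.any (fun b => pvOverlapsPy (span.1, span.2.1) (b.1, b.2.1)) then accepted
    else if accepted.any (fun a => pvOverlapsPy (span.1, span.2.1) (a.1, a.2.1)) then accepted
    else accepted ++ [span]) []

-- ===== PORT B =====
-- key(x) < key(y) for key(x) = (x0 - x1, -x4, x0)
def pvKeyLt (x y : PvSpan) : Bool :=
  decide (x.1 - x.2.1 < y.1 - y.2.1) ||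
  (decide (x.1 - x.2.1 = y.1 - y.2.1) &&
    (decide (-x.2.2.2.2 < -y.2.2.2.2) ||
     (decide (-x.2.2.2.2 = -y.2.2.2.2) && decide (x.1 < y.1))))

-- the `for sp in pool[1:]` running-best scan
def pvBestOf (b : PvSpan) (l : List PvSpan) : PvSpan :=
  l.foldl (fun b sp => if pvKeyLt sp b then sp else b) b

-- the one-pass `for sp in pool` loop: drop the first copy of best, drop overlaps, keep the rest
def pvSieve (best : PvSpan) : Bool → List PvSpan → List PvSpan
  | _, [] => []
  | removed, sp :: rest =>
    if !removed && sp == best then pvSieve best true rest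
    else if !(decide (sp.1 < best.2.1) && decide (best.1 < sp.2.1)) then sp :: pvSieve best removed rest
    else pvSieve best removed rest

-- termination facts for the while-loop (cited by pvSelLoop's decreasing_by)
theorem pvSieve_true_length_le (best : PvSpan) (l : List PvSpan) :
    (pvSieve best true l).length ≤ l.length := by
  induction l with
  | nil => simp [pvSieve]
  | cons sp rest ih =>
    simp only [pvSieve, Bool.not_true, Bool.false_and]
    by_cases hov : (!(decide (sp.1 < best.2.1) && decide (best.1 < sp.2.1))) = true
    · simp only [hov, if_true, List.length_cons]
      exact Nat.succ_le_succ ih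
    · simp only [hov, List.length_cons]
      exact Nat.le_succ_of_le ih

theorem pvSieve_false_length_lt (best : PvSpan) (l : List PvSpan) (h : best ∈ l) :
    (pvSieve best false l).length < l.length := by
  induction l with
  | nil => cases h
  | cons sp rest ih =>
    by_cases hb : (sp == best) = true
    · simp only [pvSieve, Bool.not_false, Bool.true_and, hb, if_true]
      exact Nat.lt_succ_of_le (pvSieve_true_length_le best rest)
    · have hmem : best ∈ rest := by
        rcases List.mem_cons.1 h with h1 | h1
        · exact absurd (beq_iff_eq.2 h1.symm) hb
        · exact h1
      simp only [pvSieve, Bool.not_false, Bool.true_and, hb]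
      by_cases hov : (!(decide (sp.1 < best.2.1) && decide (best.1 < sp.2.1))) = true
      · simp only [hov, if_true, List.length_cons]
        exact Nat.succ_lt_succ (ih hmem)
      · simp only [hov, List.length_cons]
        exact Nat.lt_succ_of_lt (ih hmem)

theorem pvBestOf_mem_cons (xs : List PvSpan) (x : PvSpan) : pvBestOf x xs ∈ x :: xs := by
  induction xs generalizing x with
  | nil => simp [pvBestOf]
  | cons z zs ih =>
    simp only [pvBestOf, List.foldl_cons]
    have h := ih (if pvKeyLt z x then z else x)
    simp only [pvBestOf] at h
    rcases List.mem_cons.1 h with h1 | h1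
    · rw [h1]
      split
      · simp
      · simp
    · simp [h1]

-- the `while pool:` loop
def pvSelLoop : List PvSpan → List PvSpan → List PvSpan
  | [], acc => acc
  | x :: xs, acc =>
    pvSelLoop (pvSieve (pvBestOf x xs) false (x :: xs)) (acc ++ [pvBestOf x xs])
termination_by pool _ => pool.length
decreasing_by
  exact pvSieve_false_length_lt (pvBestOf x xs) (x :: xs) (pvBestOf_mem_cons xs x)

def merge_person_widest_py_alt (spans : List (Int × Int × String × String × Int)) (blocked : List (Int × Int × String × String × Int)) : List (Int × Int × String × String × Int) :=
  let pool := spans.filter (fun sp => !(blocked.any (fun b => decide (sp.1 < b.2.1) && decide (b.1 < sp.2.1))))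
  pvSelLoop pool []

-- ===== PRECONDITION & SPEC =====
def Spec_merge_person_widest_py (spans : List (Int × Int × String × String × Int)) (blocked : List (Int × Int × String × String × Int)) (out : List (Int × Int × String × String × Int)) : Prop := out = merge_person_widest_py_alt spans blocked
instance (spans : List (Int × Int × String × String × Int)) (blocked : List (Int × Int × String × String × Int)) (out : List (Int × Int × String × String × Int)) : Decidable (Spec_merge_person_widest_py spans blocked out) := by unfold Spec_merge_person_widest_py; infer_instance

-- ===== CLAIM (what is proved, stated in full; the proofs are below) =====
def Claim_equal_merge_person_widest_py : Prop := ∀ (spans : List (Int × Int × String × String × Int)) (blocked : List (Int × Int × String × String × Int)), Dom_merge_person_widest_py spans blocked → Spec_merge_person_widest_py spans blocked (merge_person_widest_py spans blocked)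

-- ===== LEMMAS AND PROOFS =====

-- the two comparators agree
theorem pvSpanLt_eq_pvKeyLt : pvSpanLt = pvKeyLt := by
  funext x y
  simp only [pvSpanLt, pvKeyLt]
  split_ifs with h1 h2 <;>
    (rw [Bool.eq_iff_iff]; simp only [Bool.or_eq_true, Bool.and_eq_true, decide_eq_true_eq]; omega)

-- canonical overlap test (proof-side shorthand)
def pvOvl (x a : PvSpan) : Bool := decide (x.1 < a.2.1) && decide (a.1 < x.2.1)

-- order facts about pvKeyLt
theorem pvKeyLt_iff (x y : PvSpan) : pvKeyLt x y = true ↔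
    (x.1 - x.2.1 < y.1 - y.2.1 ∨ (x.1 - x.2.1 = y.1 - y.2.1 ∧
      (-x.2.2.2.2 < -y.2.2.2.2 ∨ (-x.2.2.2.2 = -y.2.2.2.2 ∧ x.1 < y.1)))) := by
  simp only [pvKeyLt, Bool.or_eq_true, Bool.and_eq_true, decide_eq_true_eq]

theorem pvKeyLt_eq_false_iff (x y : PvSpan) : pvKeyLt x y = false ↔
    ¬(x.1 - x.2.1 < y.1 - y.2.1 ∨ (x.1 - x.2.1 = y.1 - y.2.1 ∧
      (-x.2.2.2.2 < -y.2.2.2.2 ∨ (-x.2.2.2.2 = -y.2.2.2.2 ∧ x.1 < y.1)))) := by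
  rw [← pvKeyLt_iff]
  cases pvKeyLt x y <;> simp

theorem pvKeyLt_irrefl (x : PvSpan) : pvKeyLt x x = false := by
  rw [pvKeyLt_eq_false_iff]; omega

theorem pvKeyLt_trans {a b c : PvSpan} (h1 : pvKeyLt a b = true) (h2 : pvKeyLt b c = true) :
    pvKeyLt a c = true := by
  rw [pvKeyLt_iff] at h1 h2 ⊢; omega

theorem pvKeyLt_negtrans {a b c : PvSpan} (h1 : pvKeyLt a b = false) (h2 : pvKeyLt b c = false) :
    pvKeyLt a c = false := by
  rw [pvKeyLt_eq_false_iff] at h1 h2 ⊢; omega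

-- the running-best scan returns a key-minimal element
theorem pvBestOf_min (xs : List PvSpan) (x : PvSpan) :
    ∀ y, (y = x ∨ y ∈ xs) → pvKeyLt y (pvBestOf x xs) = false := by
  induction xs generalizing x with
  | nil =>
    intro y hy
    rcases hy with rfl | hy
    · simpa [pvBestOf] using pvKeyLt_irrefl y
    · cases hy
  | cons z zs ih =>
    intro y hy
    simp only [pvBestOf, List.foldl_cons] at *
    by_cases hk : pvKeyLt z x = true
    · simp only [hk, if_true]
      have hzb := ih z z (Or.inl rfl)
      rcases hy with rfl | hy
      · cases h : pvKeyLt y (List.foldl (fun b sp => if pvKeyLt sp b = true then sp else b) z zs) with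
        | false => rfl
        | true => exact absurd (pvKeyLt_trans hk h) (by simp [hzb])
      · rcases List.mem_cons.1 hy with rfl | hy
        · exact hzb
        · exact ih z y (Or.inr hy)
    · have hk' : pvKeyLt z x = false := by simpa using hk
      simp only [hk', Bool.false_eq_true, if_false]
      have hxb := ih x x (Or.inl rfl)
      rcases hy with rfl | hy
      · exact hxb
      · rcases List.mem_cons.1 hy with rfl | hy
        · exact pvKeyLt_negtrans hk' hxb
        · exact ih x y (Or.inr hy)

-- keyLt-sorted (insertion-sort output) lists, and the proof-side sort on pvKeyLt
def pvSorted (l : List PvSpan) : Prop := l.Pairwise (fun a b => pvKeyLt b a = false)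

def pvSortK (l : List PvSpan) : List PvSpan :=
  l.foldl (fun acc x => PySem.List.insertBy pvKeyLt x acc) []

theorem pvSortSpans_eq (l : List PvSpan) : pvSortSpans l = pvSortK l := by
  simp only [pvSortSpans, pvSortK, pvSpanLt_eq_pvKeyLt]

theorem pvSortK_append_singleton (l : List PvSpan) (x : PvSpan) :
    pvSortK (l ++ [x]) = PySem.List.insertBy pvKeyLt x (pvSortK l) := by
  simp [pvSortK, List.foldl_append]

theorem mem_insertBy_keyLt {y x : PvSpan} {ys : List PvSpan}
    (h : y ∈ PySem.List.insertBy pvKeyLt x ys) : y = x ∨ y ∈ ys := by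
  exact (PySem.List.mem_insertBy _ _ _ _).1 h

theorem insertBy_pairwise {x : PvSpan} {ys : List PvSpan} (h : pvSorted ys) :
    pvSorted (PySem.List.insertBy pvKeyLt x ys) := by
  induction ys with
  | nil => simp [PySem.List.insertBy, pvSorted]
  | cons y ys ih =>
    have hy : ∀ z ∈ ys, pvKeyLt z y = false := (List.pairwise_cons.1 h).1
    have hys : pvSorted ys := (List.pairwise_cons.1 h).2
    simp only [PySem.List.insertBy]
    by_cases hk : pvKeyLt x y = true
    · rw [if_pos hk]
      refine List.pairwise_cons.2 ⟨?_, h⟩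
      intro z hz
      rcases List.mem_cons.1 hz with rfl | hz
      · cases hzx : pvKeyLt z x with
        | false => rfl
        | true => exact absurd (pvKeyLt_trans hk hzx) (by simp [pvKeyLt_irrefl])
      · cases hzx : pvKeyLt z x with
        | false => rfl
        | true => exact absurd (pvKeyLt_trans hzx hk) (by simp [hy z hz])
    · rw [if_neg hk]
      refine List.pairwise_cons.2 ⟨?_, ih hys⟩
      intro z hz
      rcases mem_insertBy_keyLt hz with rfl | hz
      · simpa using hk
      · exact hy z hz

theorem pvSortK_sorted (l : List PvSpan) : pvSorted (pvSortK l) := by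
  suffices h : ∀ (l acc : List PvSpan), pvSorted acc →
      pvSorted (l.foldl (fun acc x => PySem.List.insertBy pvKeyLt x acc) acc) by
    simpa [pvSortK] using h l [] List.Pairwise.nil
  intro l
  induction l with
  | nil => intro acc h; simpa using h
  | cons x xs ih => intro acc h; exact ih _ (insertBy_pairwise h)

theorem insertBy_eq_cons_of_forall {x : PvSpan} {zs : List PvSpan}
    (h : ∀ z ∈ zs, pvKeyLt x z = true) : PySem.List.insertBy pvKeyLt x zs = x :: zs := by
  cases zs with
  | nil => simp [PySem.List.insertBy]
  | cons z zs => simp [PySem.List.insertBy, h z List.mem_cons_self]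

-- filter commutes with insertion into a sorted list
theorem insertBy_filter (p : PvSpan → Bool) {x : PvSpan} {ys : List PvSpan} (h : pvSorted ys) :
    (PySem.List.insertBy pvKeyLt x ys).filter p =
      if p x then PySem.List.insertBy pvKeyLt x (ys.filter p) else ys.filter p := by
  induction ys with
  | nil =>
    by_cases hp : p x = true <;> simp [PySem.List.insertBy, hp]
  | cons y ys ih =>
    have hy : ∀ z ∈ ys, pvKeyLt z y = false := (List.pairwise_cons.1 h).1
    have hys : pvSorted ys := (List.pairwise_cons.1 h).2
    by_cases hk : pvKeyLt x y = true
    · rw [show PySem.List.insertBy pvKeyLt x (y :: ys) = x :: y :: ys from by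
        simp [PySem.List.insertBy, hk]]
      have hcons : PySem.List.insertBy pvKeyLt x ((y :: ys).filter p) = x :: (y :: ys).filter p := by
        apply insertBy_eq_cons_of_forall
        intro z hz
        rcases List.mem_cons.1 (List.mem_of_mem_filter hz) with rfl | hz2
        · exact hk
        · cases hxz : pvKeyLt x z with
          | true => rfl
          | false => exact absurd (pvKeyLt_negtrans hxz (hy z hz2)) (by simp [hk])
      by_cases hp : p x = true
      · rw [List.filter_cons_of_pos hp, hcons, if_pos hp]
      · rw [List.filter_cons_of_neg (by simpa using hp), if_neg hp]
    · rw [show PySem.List.insertBy pvKeyLt x (y :: ys) = y :: PySem.List.insertBy pvKeyLt x ys from by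
        simp [PySem.List.insertBy, hk]]
      by_cases hp : p y = true
      · rw [List.filter_cons_of_pos hp, List.filter_cons_of_pos hp, ih hys]
        by_cases hpx : p x = true
        · rw [if_pos hpx, if_pos hpx,
            show PySem.List.insertBy pvKeyLt x (y :: ys.filter p) = y :: PySem.List.insertBy pvKeyLt x (ys.filter p) from by
              simp [PySem.List.insertBy, hk]]
        · rw [if_neg hpx, if_neg hpx]
      · rw [List.filter_cons_of_neg (by simpa using hp), List.filter_cons_of_neg (by simpa using hp), ih hys]

-- filter commutes with the stable sort
theorem pvSortK_filter (p : PvSpan → Bool) (l : List PvSpan) :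
    (pvSortK l).filter p = pvSortK (l.filter p) := by
  induction l using List.reverseRecOn with
  | nil => simp [pvSortK]
  | append_singleton l x ih =>
    rw [pvSortK_append_singleton, insertBy_filter p (pvSortK_sorted l), List.filter_append, ih]
    by_cases hp : p x = true
    · rw [if_pos hp, List.filter_cons_of_pos hp]
      simp only [List.filter_nil]
      rw [pvSortK_append_singleton]
    · rw [if_neg hp, List.filter_cons_of_neg (by simpa using hp)]
      simp

-- first-minimum characterisation of the sorted list
def pvFmin : List PvSpan → Option PvSpan
  | [] => none
  | x :: xs => some (pvBestOf x xs)

theorem pvFmin_append_singleton (l : List PvSpan) (x : PvSpan) :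
    pvFmin (l ++ [x]) = match pvFmin l with
      | none => some x
      | some b => some (if pvKeyLt x b then x else b) := by
  cases l with
  | nil => simp [pvFmin, pvBestOf]
  | cons y ys => simp [pvFmin, pvBestOf, List.foldl_append]

theorem pvFmin_min {l : List PvSpan} {b : PvSpan} (h : pvFmin l = some b) :
    ∀ y ∈ l, pvKeyLt y b = false := by
  cases l with
  | nil => cases h
  | cons x xs =>
    intro y hy
    have hb : b = pvBestOf x xs := by simpa [pvFmin] using h.symm
    subst hb
    exact pvBestOf_min xs x y (by simpa using List.mem_cons.1 hy)

theorem pvFmin_mem {l : List PvSpan} {b : PvSpan} (h : pvFmin l = some b) : b ∈ l := by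
  cases l with
  | nil => cases h
  | cons x xs =>
    have hb : b = pvBestOf x xs := by simpa [pvFmin] using h.symm
    subst hb
    exact pvBestOf_mem_cons xs x

-- LEMMA M: the stable sort peels off the first key-minimal element
theorem pvSortK_eq_fmin_cons {l : List PvSpan} {b : PvSpan} (h : pvFmin l = some b) :
    pvSortK l = b :: pvSortK (l.erase b) := by
  induction l using List.reverseRecOn generalizing b with
  | nil => cases h
  | append_singleton l x ih =>
    rw [pvFmin_append_singleton] at h
    cases hl : pvFmin l with
    | none =>
      have hle : l = [] := by
        cases l with
        | nil => rfl
        | cons y ys => simp [pvFmin] at hl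
      subst hle
      rw [hl] at h
      simp only at h
      have hb : b = x := by simpa using h.symm
      subst hb
      simp [pvSortK, PySem.List.insertBy]
    | some bl =>
      rw [hl] at h
      simp only [Option.some.injEq] at h
      by_cases hk : pvKeyLt x bl = true
      · rw [if_pos hk] at h
        subst h
        have hxnl : x ∉ l := fun hxl => absurd (pvFmin_min hl x hxl) (by simp [hk])
        rw [List.erase_append_right _ hxnl]
        simp only [List.erase_cons_head, List.append_nil]
        rw [pvSortK_append_singleton l x, ih hl]
        exact (show PySem.List.insertBy pvKeyLt x (bl :: pvSortK (l.erase bl)) = x :: bl :: pvSortK (l.erase bl) from by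
          simp [PySem.List.insertBy, hk])
      · rw [if_neg hk] at h
        subst h
        rw [List.erase_append_left _ (pvFmin_mem hl),
          pvSortK_append_singleton l x, pvSortK_append_singleton (l.erase bl) x, ih hl]
        exact (show PySem.List.insertBy pvKeyLt x (bl :: pvSortK (l.erase bl)) = bl :: PySem.List.insertBy pvKeyLt x (pvSortK (l.erase bl)) from by
          simp [PySem.List.insertBy, hk])

-- LEMMA S: the one-pass sieve = erase-then-filter
theorem pvSieve_true_eq (best : PvSpan) (l : List PvSpan) :
    pvSieve best true l = l.filter (fun sp => !(pvOvl sp best)) := by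
  induction l with
  | nil => simp [pvSieve]
  | cons sp rest ih =>
    simp only [pvSieve, Bool.not_true, Bool.false_and, Bool.false_eq_true, if_false]
    rw [show (!(decide (sp.1 < best.2.1) && decide (best.1 < sp.2.1))) = !(pvOvl sp best) from rfl]
    by_cases hov : (!(pvOvl sp best)) = true
    · rw [if_pos hov, List.filter_cons_of_pos (p := fun sp => !pvOvl sp best) hov, ih]
    · rw [if_neg hov, List.filter_cons_of_neg (p := fun sp => !pvOvl sp best) (by simpa using hov), ih]

theorem pvSieve_false_eq (best : PvSpan) {l : List PvSpan} (h : best ∈ l) :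
    pvSieve best false l = (l.erase best).filter (fun sp => !(pvOvl sp best)) := by
  induction l with
  | nil => cases h
  | cons sp rest ih =>
    by_cases hb : (sp == best) = true
    · have hsp : sp = best := beq_iff_eq.1 hb
      subst hsp
      simp only [pvSieve, Bool.not_false, Bool.true_and, hb, if_true, List.erase_cons_head]
      exact pvSieve_true_eq sp rest
    · have hmem : best ∈ rest := by
        rcases List.mem_cons.1 h with h1 | h1
        · exact absurd (beq_iff_eq.2 h1.symm) hb
        · exact h1
      have herase : (sp :: rest).erase best = sp :: rest.erase best :=
        List.erase_cons_tail (by simpa using fun hh => hb (beq_iff_eq.2 hh))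
      simp only [pvSieve, Bool.not_false, Bool.true_and, hb, Bool.false_eq_true, if_false]
      rw [show (!(decide (sp.1 < best.2.1) && decide (best.1 < sp.2.1))) = !(pvOvl sp best) from rfl, herase]
      by_cases hov : (!(pvOvl sp best)) = true
      · rw [if_pos hov, List.filter_cons_of_pos (p := fun sp => !pvOvl sp best) hov, ih hmem]
      · rw [if_neg hov, List.filter_cons_of_neg (p := fun sp => !pvOvl sp best) (by simpa using hov), ih hmem]

-- A's accepted-scan loop body
def pvGStep (acc : List PvSpan) (span : PvSpan) : List PvSpan :=
  if acc.any (fun a => pvOvl span a) then acc else acc ++ [span]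

-- LEMMA G: elements overlapping something already accepted may be dropped from the worklist
theorem pvFold_filter (p : PvSpan → Bool) :
    ∀ (s acc : List PvSpan), (∀ y ∈ s, p y = false → acc.any (fun a => pvOvl y a) = true) →
    s.foldl pvGStep acc = (s.filter p).foldl pvGStep acc := by
  intro s
  induction s with
  | nil => intro acc _; simp
  | cons y s ih =>
    intro acc hyp
    by_cases hp : p y = true
    · rw [List.filter_cons_of_pos hp]
      simp only [List.foldl_cons]
      apply ih
      intro z hz hpz
      have hz' := hyp z (List.mem_cons_of_mem _ hz) hpz
      unfold pvGStep
      split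
      · exact hz'
      · simp only [List.any_append]
        simp [hz']
    · have hov : acc.any (fun a => pvOvl y a) = true := hyp y List.mem_cons_self (by simpa using hp)
      rw [List.filter_cons_of_neg (by simpa using hp)]
      simp only [List.foldl_cons]
      rw [show pvGStep acc y = acc from by simp [pvGStep, hov]]
      exact ih acc (fun z hz hpz => hyp z (List.mem_cons_of_mem _ hz) hpz)

-- LEMMA E: greedy over the sorted list = selection loop
theorem pvMain : ∀ (n : Nat) (m acc : List PvSpan), m.length ≤ n →
    (∀ y ∈ m, acc.any (fun a => pvOvl y a) = false) →
    (pvSortK m).foldl pvGStep acc = pvSelLoop m acc := by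
  intro n
  induction n with
  | zero =>
    intro m acc hlen _
    have hm : m = [] := List.length_eq_zero_iff.1 (Nat.le_zero.1 hlen)
    subst hm
    simp [pvSortK, pvSelLoop]
  | succ n ih =>
    intro m acc hlen hacc
    cases m with
    | nil => simp [pvSortK, pvSelLoop]
    | cons x xs =>
      have hfm : pvFmin (x :: xs) = some (pvBestOf x xs) := rfl
      set best := pvBestOf x xs with hbest
      have hbm : best ∈ x :: xs := pvBestOf_mem_cons xs x
      have hnov : acc.any (fun a => pvOvl best a) = false := hacc best hbm
      rw [pvSortK_eq_fmin_cons hfm]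
      simp only [List.foldl_cons]
      rw [show pvGStep acc best = acc ++ [best] from by simp [pvGStep, hnov]]
      rw [pvFold_filter (fun sp => !(pvOvl sp best)) (pvSortK ((x :: xs).erase best)) (acc ++ [best]) ?side]
      case side =>
        intro y hy hpy
        have hov : pvOvl y best = true := by simpa using hpy
        simp [List.any_append, hov]
      rw [pvSortK_filter (fun sp => !(pvOvl sp best))]
      have hlen2 : (((x :: xs).erase best).filter (fun sp => !(pvOvl sp best))).length ≤ n := by
        have h1 : ((x :: xs).erase best).length = xs.length := by
          rw [List.length_erase_of_mem hbm]; simp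
        have h2 := List.length_filter_le (fun sp => !(pvOvl sp best)) ((x :: xs).erase best)
        simp only [List.length_cons] at hlen
        omega
      rw [ih _ _ hlen2 ?inv]
      case inv =>
        intro y hy
        have hym : y ∈ (x :: xs).erase best := List.mem_of_mem_filter hy
        have hyx : y ∈ x :: xs := List.mem_of_mem_erase hym
        have hnp : pvOvl y best = false := by simpa using List.of_mem_filter hy
        simp [List.any_append, hacc y hyx, hnp]
      conv_rhs => rw [pvSelLoop]
      rw [pvSieve_false_eq best hbm]

-- hoisting the blocked test out of A's loop: A's fold = pre-filter + accepted-only fold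
theorem pvAfold (blocked : List PvSpan) : ∀ (ss acc : List PvSpan),
    ss.foldl (fun accepted span =>
      if blocked.any (fun b => pvOverlapsPy (span.1, span.2.1) (b.1, b.2.1)) then accepted
      else if accepted.any (fun a => pvOverlapsPy (span.1, span.2.1) (a.1, a.2.1)) then accepted
      else accepted ++ [span]) acc =
    (ss.filter (fun sp => !(blocked.any (fun b => decide (sp.1 < b.2.1) && decide (b.1 < sp.2.1))))).foldl pvGStep acc := by
  intro ss
  induction ss with
  | nil => intro acc; rfl
  | cons x xs ih =>
    intro acc
    simp only [List.foldl_cons]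
    cases h : (blocked.any fun b => decide (x.1 < b.2.1) && decide (b.1 < x.2.1)) with
    | true =>
      rw [List.filter_cons,
        show (!(blocked.any fun b => decide (x.1 < b.2.1) && decide (b.1 < x.2.1))) = false from by rw [h]; rfl]
      simp only [Bool.false_eq_true, if_false]
      rw [show (if (blocked.any fun b => pvOverlapsPy (x.1, x.2.1) (b.1, b.2.1)) = true then acc
          else if (acc.any fun a => pvOverlapsPy (x.1, x.2.1) (a.1, a.2.1)) = true then acc
          else acc ++ [x]) = acc from by rw [if_pos (show (blocked.any fun b => pvOverlapsPy (x.1, x.2.1) (b.1, b.2.1)) = true from h)]]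
      exact ih acc
    | false =>
      rw [List.filter_cons,
        show (!(blocked.any fun b => decide (x.1 < b.2.1) && decide (b.1 < x.2.1))) = true from by rw [h]; rfl]
      simp only [if_true]
      simp only [List.foldl_cons]
      rw [show (if (blocked.any fun b => pvOverlapsPy (x.1, x.2.1) (b.1, b.2.1)) = true then acc
          else if (acc.any fun a => pvOverlapsPy (x.1, x.2.1) (a.1, a.2.1)) = true then acc
          else acc ++ [x]) = pvGStep acc x from by
        rw [if_neg (show ¬(blocked.any fun b => pvOverlapsPy (x.1, x.2.1) (b.1, b.2.1)) = true from by
          rw [show (blocked.any fun b => pvOverlapsPy (x.1, x.2.1) (b.1, b.2.1)) = (blocked.any fun b => decide (x.1 < b.2.1) && decide (b.1 < x.2.1)) from rfl, h]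
          simp)]
        rfl]
      exact ih (pvGStep acc x)

-- ===== VERDICT (by name: the statement is the Claim_ definition above) =====
theorem merge_person_widest_py_spec : Claim_equal_merge_person_widest_py := by
  intro spans blocked _
  show merge_person_widest_py spans blocked = merge_person_widest_py_alt spans blocked
  simp only [merge_person_widest_py, merge_person_widest_py_alt]
  rw [pvAfold blocked (pvSortSpans spans) [], pvSortSpans_eq, pvSortK_filter]
  exact pvMain _ _ [] le_rfl (fun y _ => rfl)
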